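-- pv_equiv track=rewrite | github.com/felixm98/Matplanerare | scraper.py | filter_by_allergies
-- ===== SOURCE A (Python) =====
-- def filter_by_allergies(products, allergies):
--     """
--     Filtrerar bort produkter som innehåller valda allergener
--
--     Allergier/kostrestriktioner:
--     - gluten: Filtrera bort produkter med gluten-tagg
--     - lactose: Filtrera bort produkter med lactose-tagg
--     - nuts: Filtrera bort produkter med nuts-tagg
--     - eggs: Filtrera bort produkter med eggs-tagg
--     - fish: Filtrera bort produkter med fish-tagg
--     - soy: Filtrera bort produkter med soy-tagg
--     - vegetarian: Filtrera bort produkter med meat-tagg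
--     - vegan: Filtrera bort produkter med animal-tagg
--     """
--     if not allergies:
--         return products
--
--     filtered = []
--     for product in products:
--         product_allergens = product.get('allergens', [])
--
--         # Kontrollera varje allergi
--         skip = False
--         for allergy in allergies:
--             allergy = allergy.lower()
--
--             if allergy == 'vegetarian':
--                 # Vegetarian: filtrera bort kött och fisk
--                 if 'meat' in product_allergens or 'fish' in product_allergens:
--                     skip = True
--                     break
--             elif allergy == 'vegan':
--                 # Vegan: filtrera bort alla animaliska produkter
--                 if 'animal' in product_allergens or 'meat' in product_allergens or 'fish' in product_allergens:
--                     skip = True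
--                     break
--             elif allergy in product_allergens:
--                 skip = True
--                 break
--
--         if not skip:
--             filtered.append(product)
--
--     return filtered
-- ===== SOURCE B (Python) =====
-- def filter_by_allergies(products, allergies):
--     if not allergies:
--         return products
--
--     forbidden = set()
--     for allergy in allergies:
--         allergy = allergy.lower()
--         if allergy == 'vegetarian':
--             forbidden.update(('meat', 'fish'))
--         elif allergy == 'vegan':
--             forbidden.update(('animal', 'meat', 'fish'))
--         else:
--             forbidden.add(allergy)
--
--     return [p for p in products
--             if forbidden.isdisjoint(p.get('allergens', []))]
-- ===== Notes on version B (the rewrite author's own statement) =====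
-- stated objective: faster
-- what changed: B precomputes one forbidden-tag set from the allergy list (expanding vegetarian/vegan once) and keeps each product by a single set-disjointness test, instead of re-examining and re-lowercasing every allergy (with repeated list-membership scans) inside the per-product loop.
import Mathlib
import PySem

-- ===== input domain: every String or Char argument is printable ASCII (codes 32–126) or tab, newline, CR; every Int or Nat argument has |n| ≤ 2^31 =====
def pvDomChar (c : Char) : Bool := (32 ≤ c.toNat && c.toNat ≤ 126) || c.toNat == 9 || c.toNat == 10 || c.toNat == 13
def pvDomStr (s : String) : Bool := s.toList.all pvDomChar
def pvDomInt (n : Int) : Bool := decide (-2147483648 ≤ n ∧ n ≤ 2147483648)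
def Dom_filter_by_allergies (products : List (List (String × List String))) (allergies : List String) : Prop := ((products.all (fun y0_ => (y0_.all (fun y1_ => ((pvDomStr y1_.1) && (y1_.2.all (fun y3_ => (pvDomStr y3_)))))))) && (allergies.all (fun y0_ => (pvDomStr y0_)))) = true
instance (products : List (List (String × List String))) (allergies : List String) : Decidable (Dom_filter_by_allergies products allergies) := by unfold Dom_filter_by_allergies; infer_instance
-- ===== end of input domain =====

-- B builds the forbidden-tag set once up front and keeps each product by one set-disjointness
-- test, instead of A's per-product rescan of the allergy list with a skip flag and break (objective: simpler).

-- ===== PORT A =====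
-- the inner 'for allergy in allergies' loop with its skip/break logic
def pvSkipA (product_allergens : List String) : List String → Bool
  | [] => false
  | a :: rest =>
    let allergy := PySem.Str.lower a
    if allergy == "vegetarian" then
      if product_allergens.contains "meat" || product_allergens.contains "fish" then true
      else pvSkipA product_allergens rest
    else if allergy == "vegan" then
      if product_allergens.contains "animal" || product_allergens.contains "meat" || product_allergens.contains "fish" then true
      else pvSkipA product_allergens rest
    else if product_allergens.contains allergy then true
    else pvSkipA product_allergens rest

def filter_by_allergies (products : List (List (String × List String))) (allergies : List String) : List (List (String × List String)) :=
  if allergies.isEmpty then products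
  else
    products.foldl (fun filtered product =>
      let product_allergens := (product.lookup "allergens").getD []
      if pvSkipA product_allergens allergies then filtered
      else filtered ++ [product]) []

-- ===== PORT B =====
-- 'forbidden = set(); for allergy in allergies: …'
def pvForbidden (allergies : List String) : PySem.Set String :=
  allergies.foldl (fun s a =>
    let allergy := PySem.Str.lower a
    if allergy == "vegetarian" then PySem.Set.update s ["meat", "fish"]
    else if allergy == "vegan" then PySem.Set.update s ["animal", "meat", "fish"]
    else PySem.Set.add s allergy) PySem.Set.empty

def filter_by_allergies_alt (products : List (List (String × List String))) (allergies : List String) : List (List (String × List String)) :=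
  if allergies.isEmpty then products
  else
    let forbidden := pvForbidden allergies
    products.filter (fun p => PySem.Set.isdisjoint forbidden ((p.lookup "allergens").getD []))

-- ===== PRECONDITION & SPEC =====
def Spec_filter_by_allergies (products : List (List (String × List String))) (allergies : List String) (out : List (List (String × List String))) : Prop := out = filter_by_allergies_alt products allergies
instance (products : List (List (String × List String))) (allergies : List String) (out : List (List (String × List String))) : Decidable (Spec_filter_by_allergies products allergies out) := by unfold Spec_filter_by_allergies; infer_instance

-- ===== CLAIM (what is proved, stated in full; the proofs are below) =====
def Claim_equal_filter_by_allergies : Prop := ∀ (products : List (List (String × List String))) (allergies : List String), Dom_filter_by_allergies products allergies → Spec_filter_by_allergies products allergies (filter_by_allergies products allergies)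

-- ===== LEMMAS AND PROOFS =====

-- the tags each allergy forbids (the expansion implicit in both programs' branch structure)
def pvContrib (a : String) : List String :=
  let l := PySem.Str.lower a
  if l == "vegetarian" then ["meat", "fish"]
  else if l == "vegan" then ["animal", "meat", "fish"]
  else [l]

theorem pvSkipA_cons (pa : List String) (a : String) (rest : List String) :
    pvSkipA pa (a :: rest) = (pvSkipA pa [a] || pvSkipA pa rest) := by
  simp only [pvSkipA]
  split_ifs <;> simp

theorem pvSkipA_single (pa : List String) (a : String) :
    pvSkipA pa [a] = true ↔ ∃ t ∈ pvContrib a, t ∈ pa := by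
  simp only [pvSkipA, pvContrib]
  split_ifs <;> simp_all [List.contains_iff_mem] <;> tauto

theorem pvSkipA_iff (pa : List String) (al : List String) :
    pvSkipA pa al = true ↔ ∃ a ∈ al, ∃ t ∈ pvContrib a, t ∈ pa := by
  induction al with
  | nil => simp [pvSkipA]
  | cons a rest ih =>
    rw [pvSkipA_cons, Bool.or_eq_true, ih, pvSkipA_single]
    simp

theorem mem_pvForbidden (t : String) (al : List String) :
    t ∈ pvForbidden al ↔ ∃ a ∈ al, t ∈ pvContrib a := by
  have gen : ∀ (s : PySem.Set String), t ∈ al.foldl (fun s a =>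
      let allergy := PySem.Str.lower a
      if allergy == "vegetarian" then PySem.Set.update s ["meat", "fish"]
      else if allergy == "vegan" then PySem.Set.update s ["animal", "meat", "fish"]
      else PySem.Set.add s allergy) s ↔ t ∈ s ∨ ∃ a ∈ al, t ∈ pvContrib a := by
    induction al with
    | nil => simp
    | cons a rest ih =>
      intro s
      simp only [List.foldl_cons, ih, pvContrib, List.mem_cons, exists_eq_or_imp]
      split_ifs with h1 h2 <;>
        simp [PySem.Set.mem_update, PySem.Set.mem_add, or_assoc]
  simpa [pvForbidden, PySem.Set.empty] using gen PySem.Set.empty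

theorem keep_eq (pa : List String) (al : List String) :
    (PySem.Set.isdisjoint (pvForbidden al) pa) = !pvSkipA pa al := by
  have h : (PySem.Set.isdisjoint (pvForbidden al) pa = true) ↔ ¬ (pvSkipA pa al = true) := by
    rw [PySem.Set.isdisjoint_iff, pvSkipA_iff]
    constructor
    · rintro h ⟨a, ha, t, ht, htpa⟩
      exact h t ((mem_pvForbidden t al).mpr ⟨a, ha, ht⟩) htpa
    · intro h x hx hxpa
      obtain ⟨a, ha, ht⟩ := (mem_pvForbidden x al).mp hx
      exact h ⟨a, ha, x, ht, hxpa⟩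
  cases hb : pvSkipA pa al with
  | false => simpa using h.mpr (by simp [hb])
  | true => simp only [Bool.not_true]; exact Bool.eq_false_iff.mpr (fun hd => (h.mp hd) hb)

-- ===== VERDICT (by name: the statement is the Claim_ definition above) =====
theorem filter_by_allergies_spec : Claim_equal_filter_by_allergies := by
  intro products allergies _
  unfold Spec_filter_by_allergies filter_by_allergies filter_by_allergies_alt
  by_cases h : allergies.isEmpty
  · simp [h]
  · simp only [h, if_false]
    have hfun : (fun (filtered : List (List (String × List String))) product =>
        let product_allergens := (product.lookup "allergens").getD []
        if pvSkipA product_allergens allergies then filtered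
        else filtered ++ [product])
      = (fun filtered x =>
        if (!pvSkipA ((x.lookup "allergens").getD []) allergies) = true then filtered ++ [id x] else filtered) := by
      funext acc p
      cases hs : pvSkipA ((p.lookup "allergens").getD []) allergies <;> simp [hs]
    rw [hfun, PySem.List.foldl_append_if]
    simp only [List.map_id, List.nil_append]
    apply List.filter_congr
    intro p _
    rw [keep_eq]
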